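-- pv_equiv track=rewrite | github.com/OdyOSG/conceptSetReview | conceptSetReview/review.py | extract_first_markdown_table
-- ===== SOURCE A (Python) =====
-- def extract_first_markdown_table(text):
--     """
--     Extracts the first markdown table found in the provided text.
--     """
--     lines = text.splitlines()
--     table_lines = []
--     in_table = False
--     for line in lines:
--         if line.strip().startswith("|"):
--             table_lines.append(line)
--             in_table = True
--         elif in_table:
--             break
--
--     return "\n".join(table_lines)
-- ===== SOURCE B (Python) =====
-- def extract_first_markdown_table(text):
--     def is_row(line):
--         return line.strip().startswith("|")
--     rest = text.splitlines()
--     while rest and not is_row(rest[0]):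
--         rest = rest[1:]
--     table = []
--     while rest and is_row(rest[0]):
--         table.append(rest[0])
--         rest = rest[1:]
--     return "\n".join(table)
-- ===== Notes on version B (the rewrite author's own statement) =====
-- stated objective: idiomatic
-- what changed: Replaces the stateful single loop with an in_table flag and break by a two-phase drop-while/take-while decomposition: first skip leading non-table lines, then collect the contiguous block of table lines.
import Mathlib
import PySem

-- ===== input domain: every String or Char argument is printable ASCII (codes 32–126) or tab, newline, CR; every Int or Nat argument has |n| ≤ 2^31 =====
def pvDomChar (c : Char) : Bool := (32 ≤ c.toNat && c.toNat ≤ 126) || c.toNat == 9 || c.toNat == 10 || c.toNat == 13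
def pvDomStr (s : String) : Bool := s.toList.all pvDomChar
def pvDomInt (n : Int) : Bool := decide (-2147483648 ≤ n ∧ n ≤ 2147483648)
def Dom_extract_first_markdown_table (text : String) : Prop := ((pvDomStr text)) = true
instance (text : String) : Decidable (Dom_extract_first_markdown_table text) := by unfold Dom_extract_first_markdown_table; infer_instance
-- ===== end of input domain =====

-- B replaces A's stateful flag-and-break loop by a drop-while/take-while two-phase decomposition (idiomatic; same return value).

-- ===== PORT A =====
-- line.strip().startswith("|")
def pvIsRowA (line : String) : Bool := PySem.Str.startswith (PySem.Str.strip line) "|"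

-- the for loop over lines with accumulator table_lines and flag in_table; break = return acc
def pvLoopA : List String → List String → Bool → List String
  | [], acc, _ => acc
  | l :: ls, acc, inTable =>
    if pvIsRowA l then pvLoopA ls (acc ++ [l]) true
    else if inTable then acc
    else pvLoopA ls acc inTable

def extract_first_markdown_table (text : String) : String :=
  PySem.Str.join "\n" (pvLoopA (PySem.Str.splitlines text) [] false)

-- ===== PORT B =====
def pvIsRowB (line : String) : Bool := PySem.Str.startswith (PySem.Str.strip line) "|"

def extract_first_markdown_table_alt (text : String) : String :=
  -- first while loop: drop leading non-table lines
  let rest := (PySem.Str.splitlines text).dropWhile (fun l => !pvIsRowB l)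
  -- second while loop: collect the contiguous block of table lines
  let table := rest.takeWhile pvIsRowB
  PySem.Str.join "\n" table

-- ===== PRECONDITION & SPEC =====
def Spec_extract_first_markdown_table (text : String) (out : String) : Prop := out = extract_first_markdown_table_alt text
instance (text : String) (out : String) : Decidable (Spec_extract_first_markdown_table text out) := by unfold Spec_extract_first_markdown_table; infer_instance

-- ===== CLAIM (what is proved, stated in full; the proofs are below) =====
def Claim_equal_extract_first_markdown_table : Prop := ∀ (text : String), Dom_extract_first_markdown_table text → Spec_extract_first_markdown_table text (extract_first_markdown_table text)

-- ===== LEMMAS AND PROOFS =====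
theorem pvLoopA_true (ls : List String) (acc : List String) :
    pvLoopA ls acc true = acc ++ ls.takeWhile pvIsRowA := by
  induction ls generalizing acc with
  | nil => simp [pvLoopA]
  | cons l ls ih =>
    by_cases h : pvIsRowA l = true
    · simp [pvLoopA, h, ih]
    · simp [pvLoopA, h]

theorem pvLoopA_false (ls : List String) (acc : List String) :
    pvLoopA ls acc false =
      acc ++ ((ls.dropWhile (fun l => !pvIsRowA l)).takeWhile pvIsRowA) := by
  induction ls generalizing acc with
  | nil => simp [pvLoopA]
  | cons l ls ih =>
    by_cases h : pvIsRowA l = true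
    · simp [pvLoopA, h, pvLoopA_true]
    · simp [pvLoopA, h, ih]

-- ===== VERDICT (by name: the statement is the Claim_ definition above) =====
theorem extract_first_markdown_table_spec : Claim_equal_extract_first_markdown_table := by
  intro text _
  unfold Spec_extract_first_markdown_table extract_first_markdown_table extract_first_markdown_table_alt
  rw [pvLoopA_false]
  rfl
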